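-- pv_equiv track=rewrite | github.com/lammandy/alfy_projects | Week_2/functions.py | orthogonal_number
-- ===== SOURCE A (Python) =====
-- def is_empty_vector(vec_lst):
--
--     prev_vec_length = len(vec_lst[0])
--     for vec in vec_lst:
--         if len(vec) != prev_vec_length:
--             return True
--         prev_vec_length = len(vec)
--     return False
--
-- def calc_the_inner_product(vec_1, vec_2):
--     prod = 0
--     if not is_empty_vector([vec_1, vec_2]):
--         for i in range(len(vec_1)):
--             prod += (vec_1[i] * vec_2[i])
--     else:
--         return None
--     return prod
--
-- def orthogonal_number(vectors):
--     ortho_pairs = 0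
--     for i in range(len(vectors))[:-1]:
--         for j in range(len(vectors))[i+1:]:
--             prod = calc_the_inner_product(vectors[i], vectors[j])
--             if prod == 0:
--                 ortho_pairs += 1
--     return ortho_pairs
-- ===== SOURCE B (Python) =====
-- def orthogonal_number(vectors):
--     # group the vectors by length, then count orthogonal pairs within each group
--     groups = {}
--     for v in vectors:
--         groups.setdefault(len(v), []).append(v)
--     count = 0
--     for group in groups.values():
--         rest = group
--         while rest:
--             v = rest[0]
--             rest = rest[1:]
--             count += sum(1 for w in rest if sum(x * y for x, y in zip(v, w)) == 0)
--     return count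
-- ===== Notes on version B (the rewrite author's own statement) =====
-- stated objective: alternative
-- what changed: B buckets the vectors by length in one dict pass and counts zero-inner-product pairs only inside each length-group (zip-based dot product), instead of A's all-pairs double index loop that tests each pair's lengths and bails out pairwise.
import Mathlib
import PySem

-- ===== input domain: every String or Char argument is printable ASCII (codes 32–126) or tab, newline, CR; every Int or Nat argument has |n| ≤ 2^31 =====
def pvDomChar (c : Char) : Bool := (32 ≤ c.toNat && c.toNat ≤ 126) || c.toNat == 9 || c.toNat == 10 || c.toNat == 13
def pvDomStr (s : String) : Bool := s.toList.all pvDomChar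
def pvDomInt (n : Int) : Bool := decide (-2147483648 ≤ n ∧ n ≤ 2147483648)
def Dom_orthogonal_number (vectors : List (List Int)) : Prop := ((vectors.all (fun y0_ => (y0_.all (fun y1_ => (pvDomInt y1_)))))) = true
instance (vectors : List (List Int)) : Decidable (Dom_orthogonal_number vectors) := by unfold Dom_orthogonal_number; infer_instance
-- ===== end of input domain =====

-- B groups the vectors by length (one dict pass) and counts orthogonal pairs inside each
-- length-group only, instead of A's all-pairs index loops with a pairwise length check.

-- ===== PORT A =====
-- Python's early-return scan of is_empty_vector, carrying prev_vec_length
def is_empty_vector_loop : List (List Int) → Int → Bool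
  | [], _ => false
  | v :: rest, prev => if (v.length : Int) ≠ prev then true else is_empty_vector_loop rest (v.length : Int)

-- vec_lst[0]: every caller passes the two-element list [vec_1, vec_2], so index 0 is in range
-- and pyGetD with default [] is exact there
def is_empty_vector (vec_lst : List (List Int)) : Bool :=
  is_empty_vector_loop vec_lst ((PySem.List.pyGetD vec_lst 0 []).length : Int)

def calc_the_inner_product (vec_1 vec_2 : List Int) : Option Int :=
  if !is_empty_vector [vec_1, vec_2] then
    some ((PySem.List.pyRange 0 (vec_1.length : Int) 1).foldl
      (fun prod i => prod + PySem.List.pyGetD vec_1 i 0 * PySem.List.pyGetD vec_2 i 0) 0)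
  else none

-- indices produced by the two ranges are always in range for vectors, so pyGetD is exact
def orthogonal_number (vectors : List (List Int)) : Int :=
  (PySem.List.slice (PySem.List.pyRange 0 (vectors.length : Int) 1) none (some (-1))).foldl
    (fun acc i =>
      (PySem.List.slice (PySem.List.pyRange 0 (vectors.length : Int) 1) (some (i + 1)) none).foldl
        (fun acc2 j =>
          if calc_the_inner_product (PySem.List.pyGetD vectors i []) (PySem.List.pyGetD vectors j []) = some 0
          then acc2 + 1 else acc2)
        acc)
    0

-- ===== PORT B =====
-- sum(x * y for x, y in zip(v, w))
def pvDot (v w : List Int) : Int := (v.zip w).foldl (fun a p => a + p.1 * p.2) 0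

-- the while loop of B: split off the head, count its orthogonal partners in the rest, repeat
def pvGroupPairs (count : Int) : List (List Int) → Int
  | [] => count
  | v :: rest =>
    pvGroupPairs (count + rest.foldl (fun a w => if pvDot v w = 0 then a + 1 else a) 0) rest

def orthogonal_number_alt (vectors : List (List Int)) : Int :=
  let groups := vectors.foldl (fun d v => d.modify (v.length : Int) [] (· ++ [v])) PySem.Dict.empty
  groups.values.foldl (fun count g => pvGroupPairs count g) 0

-- ===== PRECONDITION & SPEC =====
def Spec_orthogonal_number (vectors : List (List Int)) (out : Int) : Prop := out = orthogonal_number_alt vectors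
instance (vectors : List (List Int)) (out : Int) : Decidable (Spec_orthogonal_number vectors out) := by unfold Spec_orthogonal_number; infer_instance

-- ===== CLAIM (what is proved, stated in full; the proofs are below) =====
def Claim_equal_orthogonal_number : Prop := ∀ (vectors : List (List Int)), Dom_orthogonal_number vectors → Spec_orthogonal_number vectors (orthogonal_number vectors)

-- ===== LEMMAS AND PROOFS =====

-- the predicate A tests on a pair: equal lengths and zero inner product
def pvP (v w : List Int) : Bool := (v.length == w.length) && decide (pvDot v w = 0)

-- canonical pair count, structurally over the list
def pvCnt : List (List Int) → Int
  | [] => 0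
  | v :: rest => (rest.countP (fun w => pvP v w) : Int) + pvCnt rest

-- A's value rewritten as a sum over Nat index ranges
def pvF (vs : List (List Int)) : Int :=
  ((List.range (vs.length - 1)).map (fun k =>
     (((List.range (vs.length - (k + 1))).countP
        (fun t => pvP (vs.getD k []) (vs.getD (k + 1 + t) []))) : Int))).sum

-- B's countP-style per-group pair count
def pvPC : List (List Int) → Int
  | [] => 0
  | v :: rest => (rest.countP (fun w => decide (pvDot v w = 0)) : Int) + pvPC rest

def pvLens (vs : List (List Int)) : List Int := PySem.Set.ofList (vs.map (fun v => (v.length : Int)))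

-- B's value rewritten as a sum over the distinct lengths
def pvS (vs : List (List Int)) : Int :=
  ((pvLens vs).map (fun L => pvPC (vs.filter (fun v => ((v.length : Int) == L))))).sum

lemma pv_empty_iff (v w : List Int) : is_empty_vector [v, w] = !(v.length == w.length) := by
  by_cases h : w.length = v.length
  · simp [is_empty_vector, is_empty_vector_loop, PySem.List.pyGetD_zero_cons, h]
  · simp [is_empty_vector, is_empty_vector_loop, PySem.List.pyGetD_zero_cons, h]
    omega

lemma pv_dot_range (v : List Int) : ∀ (w : List Int) (acc : Int), v.length = w.length →
    (List.range v.length).foldl (fun a k => a + v.getD k 0 * w.getD k 0) acc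
      = (v.zip w).foldl (fun a p => a + p.1 * p.2) acc := by
  induction v with
  | nil => intro w acc h; simp
  | cons x v' ih =>
    intro w acc h
    cases w with
    | nil => simp at h
    | cons y w' =>
      simp only [List.length_cons, List.range_succ_eq_map, List.foldl_cons, List.foldl_map,
        List.getD_cons_zero, List.getD_cons_succ, List.zip_cons_cons]
      exact ih w' _ (by simpa using h)

lemma pv_calc_closed (v w : List Int) :
    calc_the_inner_product v w = if v.length = w.length then some (pvDot v w) else none := by
  by_cases h : v.length = w.length
  · have hb : is_empty_vector [v, w] = false := by rw [pv_empty_iff]; simp [h]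
    have key : (PySem.List.pyRange 0 ((v.length : Int)) 1).foldl
        (fun prod i => prod + PySem.List.pyGetD v i 0 * PySem.List.pyGetD w i 0) 0 = pvDot v w := by
      rw [PySem.List.pyRange_zero_natCast, List.foldl_map]
      simp only [PySem.List.pyGetD_natCast]
      exact pv_dot_range v w 0 h
    have hcond : (!is_empty_vector [v, w]) = true := by rw [hb]; rfl
    rw [calc_the_inner_product, if_pos hcond, if_pos h, key]
  · simp [calc_the_inner_product, pv_empty_iff, h]

lemma pv_decide_calc (v w : List Int) :
    decide (calc_the_inner_product v w = some 0) = pvP v w := by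
  rw [pv_calc_closed]
  by_cases h : v.length = w.length
  · simp [pvP, h]
  · simp [pvP, h]

lemma pv_range_drop (n m : Nat) :
    (List.range n).drop m = (List.range (n - m)).map (fun t => m + t) := by
  apply List.ext_getElem
  · simp
  · intro i h1 h2
    simp at h1 h2 ⊢
    try omega

lemma pv_map_drop {α β : Type} (f : α → β) (l : List α) (n : Nat) :
    (l.map f).drop n = (l.drop n).map f := by
  apply List.ext_getElem
  · simp
  · intro i h1 h2
    simp at h1 h2 ⊢

lemma pv_range_dropLast (n : Nat) : (List.range n).dropLast = List.range (n - 1) := by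
  cases n with
  | zero => simp
  | succ m => rw [List.range_succ]; simp

lemma pv_inner_fold (vs : List (List Int)) (k : Nat) : ∀ (l : List Nat) (acc : Int),
    l.foldl (fun x y =>
      if calc_the_inner_product (PySem.List.pyGetD vs ((k : Nat) : Int) [])
          (PySem.List.pyGetD vs (((k + 1 + y : Nat)) : Int) []) = some 0
      then x + 1 else x) acc
    = acc + (l.countP (fun t => pvP (vs.getD k []) (vs.getD (k + 1 + t) [])) : Int) := by
  intro l
  induction l with
  | nil => intro acc; simp
  | cons t l ih =>
    intro acc
    rw [List.foldl_cons, List.countP_cons, ih]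
    simp only [PySem.List.pyGetD_natCast]
    by_cases hc : pvP (vs.getD k []) (vs.getD (k + 1 + t) []) = true
    · rw [if_pos (of_decide_eq_true ((pv_decide_calc _ _).trans hc)), hc]
      simp
      ring
    · have hb : pvP (vs.getD k []) (vs.getD (k + 1 + t) []) = false := by
        cases hpb : pvP (vs.getD k []) (vs.getD (k + 1 + t) []) <;> simp_all
      have hcf : ¬ (calc_the_inner_product (vs.getD k []) (vs.getD (k + 1 + t) []) = some 0) :=
        fun hcc => hc ((pv_decide_calc _ _).symm.trans (decide_eq_true hcc))
      rw [if_neg hcf, hb]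
      simp

lemma pv_A_eq_F (vs : List (List Int)) : orthogonal_number vs = pvF vs := by
  unfold orthogonal_number
  rw [PySem.List.slice_to_neg_one, PySem.List.pyRange_zero_natCast,
    ← List.map_dropLast, pv_range_dropLast, List.foldl_map]
  have inner : ∀ (k : Nat) (acc : Int),
      (PySem.List.slice (List.map (fun k => ((k : Nat) : Int)) (List.range vs.length)) (some ((k : Int) + 1)) none).foldl
        (fun acc2 j =>
          if calc_the_inner_product (PySem.List.pyGetD vs (k : Int) []) (PySem.List.pyGetD vs j []) = some 0
          then acc2 + 1 else acc2) acc
      = acc + (((List.range (vs.length - (k + 1))).countP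
          (fun t => pvP (vs.getD k []) (vs.getD (k + 1 + t) []))) : Int) := by
    intro k acc
    rw [show ((k : Int) + 1) = ((k + 1 : Nat) : Int) by push_cast; ring,
        PySem.List.slice_from_natCast]
    rw [pv_map_drop, pv_range_drop, List.map_map, List.foldl_map]
    simp only [Function.comp_def]
    exact pv_inner_fold vs k _ acc
  rw [PySem.List.foldl_congr_mem _ _
    (fun (acc : Int) (k : Nat) => acc + (((List.range (vs.length - (k + 1))).countP
      (fun t => pvP (vs.getD k []) (vs.getD (k + 1 + t) []))) : Int)) _
    (by intro acc k _; exact inner k acc)]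
  rw [PySem.List.foldl_add]
  try simp [pvF]

lemma pv_countP_range_getD {α : Type} (xs : List α) (d : α) (p : α → Bool) :
    (List.range xs.length).countP (fun t => p (xs.getD t d)) = xs.countP p := by
  induction xs with
  | nil => simp
  | cons x xs ih =>
    simp only [List.length_cons, List.range_succ_eq_map, List.countP_cons, List.countP_map]
    try simp only [Function.comp_def, List.getD_cons_succ, List.getD_cons_zero]
    try rw [ih]
    try omega

lemma pv_countP_range_congr {p q : Nat → Bool} {n m : Nat} (hn : n = m)
    (h : ∀ t, p t = q t) : (List.range n).countP p = (List.range m).countP q := by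
  subst hn
  exact List.countP_congr (fun t _ => by rw [h t])

lemma pv_F_cons (v : List Int) (rest : List (List Int)) :
    pvF (v :: rest) = (rest.countP (fun w => pvP v w) : Int) + pvF rest := by
  cases rest with
  | nil => simp [pvF]
  | cons r rest' =>
    unfold pvF
    rw [show (v :: r :: rest').length - 1 = rest'.length + 1 by simp]
    rw [show (r :: rest').length - 1 = rest'.length by simp]
    rw [List.range_succ_eq_map, List.map_cons, List.sum_cons, List.map_map]
    congr 1
    · rw [← pv_countP_range_getD (r :: rest') [] (fun w => pvP v w)]
      exact congrArg Nat.cast (pv_countP_range_congr (by simp) (fun t => by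
        rw [show (0 + 1 + t) = t + 1 by omega]
        simp))
    · apply congrArg List.sum
      apply List.map_congr_left
      intro k _
      simp only [Function.comp_def, Nat.succ_eq_add_one]
      exact congrArg Nat.cast (pv_countP_range_congr (by simp) (fun t => by
        rw [show (k + 1 + 1 + t) = (k + 1 + t) + 1 by omega]
        simp))

lemma pv_F_eq_cnt (vs : List (List Int)) : pvF vs = pvCnt vs := by
  induction vs with
  | nil => simp [pvF, pvCnt]
  | cons v rest ih => rw [pv_F_cons, ih]; simp [pvCnt]

lemma pv_groupPairs_eq (g : List (List Int)) : ∀ c : Int, pvGroupPairs c g = c + pvPC g := by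
  induction g with
  | nil => intro c; simp [pvGroupPairs, pvPC]
  | cons v rest ih =>
    intro c
    rw [pvGroupPairs, ih, pvPC, PySem.List.foldl_ite_add_one (p := fun w => pvDot v w = 0)]
    ring

lemma pv_B_eq_S (vs : List (List Int)) : orthogonal_number_alt vs = pvS vs := by
  show (vs.foldl (fun d v => d.modify ((v.length : Int)) [] (· ++ [v])) PySem.Dict.empty).values.foldl
        (fun count g => pvGroupPairs count g) 0 = pvS vs
  have hnd : (vs.foldl (fun d v => d.modify ((v.length : Int)) [] (· ++ [v])) PySem.Dict.empty).keys.Nodup := by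
    apply PySem.Dict.nodup_keys_foldl_modify_key vs (fun v => ((v.length : Int))) []
      (fun _ v => (· ++ [v]))
    simp [PySem.Dict.keys_empty]
  have hkeys : (vs.foldl (fun d v => d.modify ((v.length : Int)) [] (· ++ [v])) PySem.Dict.empty).keys
      = pvLens vs := by
    rw [PySem.Dict.keys_foldl_modify_key vs (fun v => ((v.length : Int))) [] (fun _ v => (· ++ [v]))]
    simp [PySem.Dict.keys_empty, PySem.Set.update_nil_left, pvLens]
  have hgetD : ∀ L : Int,
      (vs.foldl (fun d v => d.modify ((v.length : Int)) [] (· ++ [v])) PySem.Dict.empty).getD L []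
        = vs.filter (fun v => ((v.length : Int) == L)) := by
    intro L
    rw [show (vs.foldl (fun d v => d.modify ((v.length : Int)) [] (· ++ [v])) PySem.Dict.empty)
          = ((vs.map (fun v => (((v.length : Int)), v))).foldl
              (fun d p => d.modify p.1 [] (· ++ [p.2])) PySem.Dict.empty) by
        rw [List.foldl_map]]
    rw [PySem.Dict.getD_foldl_modify_append, List.filter_map]
    simp [Function.comp_def]
  rw [PySem.Dict.values_eq_map_keys _ hnd [], List.foldl_map]
  rw [PySem.List.foldl_congr_mem _ _
    (fun (c : Int) k => c + pvPC ((vs.foldl (fun d v => d.modify ((v.length : Int)) [] (· ++ [v])) PySem.Dict.empty).getD k [])) _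
    (by intro acc k _; exact pv_groupPairs_eq _ acc)]
  rw [PySem.List.foldl_add, hkeys]
  simp only [hgetD, pvS, zero_add]

lemma pv_cnt_append (xs : List (List Int)) (y : List Int) :
    pvCnt (xs ++ [y]) = pvCnt xs + (xs.countP (fun w => pvP w y) : Int) := by
  induction xs with
  | nil => simp [pvCnt]
  | cons x xs ih =>
    simp only [List.cons_append, pvCnt, ih, List.countP_append, List.countP_cons, List.countP_nil]
    push_cast
    by_cases h : pvP x y = true <;> simp [h] <;> ring

lemma pv_pc_append (xs : List (List Int)) (y : List Int) :
    pvPC (xs ++ [y]) = pvPC xs + (xs.countP (fun w => decide (pvDot w y = 0)) : Int) := by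
  induction xs with
  | nil => simp [pvPC]
  | cons x xs ih =>
    simp only [List.cons_append, pvPC, ih, List.countP_append, List.countP_cons, List.countP_nil]
    push_cast
    by_cases h : pvDot x y = 0 <;> simp [h] <;> ring

lemma pv_sum_map_update (l : List Int) (L : Int) (f g : Int → Int)
    (hnd : l.Nodup) (hL : L ∈ l) (hne : ∀ x ∈ l, x ≠ L → g x = f x) :
    (l.map g).sum = (l.map f).sum + (g L - f L) := by
  induction l with
  | nil => simp at hL
  | cons a l ih =>
    rcases List.mem_cons.mp hL with rfl | hmem
    · have hl : ∀ x ∈ l, g x = f x := by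
        intro x hx
        exact hne x (List.mem_cons_of_mem _ hx) (fun h => (List.nodup_cons.mp hnd).1 (h ▸ hx))
      simp only [List.map_cons, List.sum_cons]
      rw [List.map_congr_left hl]
      ring
    · have ha : a ≠ L := fun h => (List.nodup_cons.mp hnd).1 (h ▸ hmem)
      simp only [List.map_cons, List.sum_cons]
      rw [hne a (by simp) ha,
        ih (List.nodup_cons.mp hnd).2 hmem (fun x hx => hne x (List.mem_cons_of_mem _ hx))]
      ring

lemma pv_lens_nodup (xs : List (List Int)) : (pvLens xs).Nodup := by
  unfold pvLens
  exact PySem.Set.nodup_ofList _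

lemma pv_lens_append (xs : List (List Int)) (y : List Int) :
    pvLens (xs ++ [y]) = PySem.Set.add (pvLens xs) ((y.length : Int)) := by
  simp [pvLens, PySem.Set.ofList_eq_foldl, List.foldl_append]

lemma pv_S_eq_cnt (vs : List (List Int)) : pvS vs = pvCnt vs := by
  induction vs using List.reverseRecOn with
  | nil => simp [pvS, pvLens, pvCnt]
  | append_singleton xs y ih =>
    have hfilter_ne : ∀ K : Int, K ≠ (y.length : Int) →
        (xs ++ [y]).filter (fun v => ((v.length : Int) == K)) = xs.filter (fun v => ((v.length : Int) == K)) := by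
      intro K hK
      rw [List.filter_append]
      simp [hK.symm]
    have hfilter_eq :
        (xs ++ [y]).filter (fun v => ((v.length : Int) == (y.length : Int)))
          = xs.filter (fun v => ((v.length : Int) == (y.length : Int))) ++ [y] := by
      rw [List.filter_append]; simp
    have hcnt := pv_cnt_append xs y
    have hdelta :
        ((xs.filter (fun v => ((v.length : Int) == (y.length : Int)))).countP
            (fun w => decide (pvDot w y = 0)) : Int)
          = (xs.countP (fun w => pvP w y) : Int) := by
      rw [List.countP_filter]
      congr 1
      apply List.countP_congr
      intro w _
      by_cases h : w.length = y.length <;> simp [pvP, h]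
    by_cases hmem : ((y.length : Int)) ∈ pvLens xs
    · have hlens : pvLens (xs ++ [y]) = pvLens xs := by
        rw [pv_lens_append, PySem.Set.add_of_mem hmem]
      rw [pvS, hlens, hcnt, ← ih]
      rw [pv_sum_map_update (pvLens xs) ((y.length : Int))
        (fun L => pvPC (xs.filter (fun v => ((v.length : Int) == L))))
        (fun L => pvPC ((xs ++ [y]).filter (fun v => ((v.length : Int) == L))))
        (pv_lens_nodup xs) hmem
        (fun K _ hK => congrArg pvPC (hfilter_ne K hK))]
      rw [hfilter_eq, pv_pc_append, hdelta]
      unfold pvS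
      ring
    · have hnolen : ∀ w ∈ xs, (w.length : Int) ≠ (y.length : Int) := by
        intro w hw h
        exact hmem (by
          simp only [pvLens, PySem.Set.mem_ofList]
          exact h ▸ List.mem_map_of_mem hw)
      have hlens : pvLens (xs ++ [y]) = pvLens xs ++ [((y.length : Int))] := by
        rw [pv_lens_append, PySem.Set.add_of_not_mem hmem]
      rw [pvS, hlens, List.map_append, List.sum_append, hcnt, ← ih]
      have h1 : (pvLens xs).map (fun L => pvPC ((xs ++ [y]).filter (fun v => ((v.length : Int) == L))))
          = (pvLens xs).map (fun L => pvPC (xs.filter (fun v => ((v.length : Int) == L)))) := by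
        apply List.map_congr_left
        intro K hK
        exact congrArg pvPC (hfilter_ne K (fun h => hmem (h ▸ hK)))
      have h2 : xs.filter (fun v => ((v.length : Int) == (y.length : Int))) = [] := by
        rw [List.filter_eq_nil_iff]
        intro w hw
        simp [hnolen w hw]
      have h3 : (xs.countP (fun w => pvP w y) : Int) = 0 := by
        norm_cast
        rw [List.countP_eq_zero]
        intro w hw
        simp only [pvP, Bool.and_eq_true, beq_iff_eq, decide_eq_true_eq, not_and]
        intro hlen
        exact absurd (by exact_mod_cast hlen) (hnolen w hw)
      rw [h1]
      simp only [List.map_cons, List.map_nil, List.sum_cons, List.sum_nil]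
      rw [hfilter_eq, h2, h3]
      simp [pvPC, pvS]

-- ===== VERDICT (by name: the statement is the Claim_ definition above) =====
theorem orthogonal_number_spec : Claim_equal_orthogonal_number := by
  intro vectors _
  show orthogonal_number vectors = orthogonal_number_alt vectors
  rw [pv_A_eq_F, pv_F_eq_cnt, pv_B_eq_S, pv_S_eq_cnt]
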